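-- pv_equiv track=rewrite | github.com/aecwells/hwautomation | src/hwautomation/hardware/discovery.py | _parse_dmidecode_bios
-- ===== SOURCE A (Python) =====
-- from typing import Any, Dict, List, Optional, Tuple
--
-- def _parse_dmidecode_bios(output: str) -> Dict[str, str]:
--     """Parse dmidecode BIOS output."""
--     bios_info = {}
--
--     for line in output.split("\n"):
--         line = line.strip()
--         if line.startswith("Version:"):
--             bios_info["version"] = line.split(":", 1)[1].strip()
--         elif line.startswith("Release Date:"):
--             bios_info["date"] = line.split(":", 1)[1].strip()
--
--     return bios_info
-- ===== SOURCE B (Python) =====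
-- def _parse_dmidecode_bios(output: str):
--     """Parse dmidecode BIOS output."""
--     FIELDS = {"Version": "version", "Release Date": "date"}
--     table = {}
--     for line in output.split("\n"):
--         line = line.strip()
--         if ":" in line:
--             key, value = line.split(":", 1)
--             table[key] = value.strip()
--     return {FIELDS[k]: v for k, v in table.items() if k in FIELDS}
-- ===== Notes on version B (the rewrite author's own statement) =====
-- stated objective: alternative
-- what changed: B replaces A's inline two-branch scan with a build-then-select decomposition: one generic pass stores every 'key: value' line (first-colon split, key unstripped) in a table, and the result is projected from the table's two exact keys afterwards.
import Mathlib
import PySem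

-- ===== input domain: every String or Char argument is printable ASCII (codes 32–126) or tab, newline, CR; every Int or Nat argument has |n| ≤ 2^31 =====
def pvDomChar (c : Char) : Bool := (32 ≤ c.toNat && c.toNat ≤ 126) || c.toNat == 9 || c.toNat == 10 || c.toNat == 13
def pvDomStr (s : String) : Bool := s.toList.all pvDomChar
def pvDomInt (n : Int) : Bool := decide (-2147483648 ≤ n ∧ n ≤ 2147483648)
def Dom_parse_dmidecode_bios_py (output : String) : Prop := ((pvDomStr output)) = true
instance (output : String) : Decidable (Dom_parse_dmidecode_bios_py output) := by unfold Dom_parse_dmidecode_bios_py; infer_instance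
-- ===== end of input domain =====

-- B replaces A's inline two-branch scan with a build-then-select decomposition (one generic pass
-- storing every 'key: value' line in a table, then projecting the two exact keys); alternative
-- structure, same complexity.

-- ===== PORT A =====
-- loop body of A: strip the line, then the two startswith branches
def pvStepA (bios : PySem.Dict String String) (line : String) : PySem.Dict String String :=
  let l := PySem.Str.strip line
  -- line.split(":", 1)[1]: under the startswith guard the line contains ':', so the split (sep ≠ "")
  -- is some and has two pieces; the .getD defaults can never be reached
  if PySem.Str.startswith l "Version:" then
    bios.insert "version" (PySem.Str.strip ((PySem.List.pyGet? ((PySem.Str.splitMax? l ":" 1).getD []) 1).getD ""))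
  else if PySem.Str.startswith l "Release Date:" then
    bios.insert "date" (PySem.Str.strip ((PySem.List.pyGet? ((PySem.Str.splitMax? l ":" 1).getD []) 1).getD ""))
  else
    bios

def parse_dmidecode_bios_py (output : String) : List (String × String) :=
  (((PySem.Str.split? output "\n").getD []).foldl pvStepA PySem.Dict.empty).items

-- ===== PORT B =====
def pvFields : PySem.Dict String String :=
  (PySem.Dict.empty.insert "Version" "version").insert "Release Date" "date"

-- loop body of B: strip the line and, if it has a colon, store key (NOT stripped) → stripped value
def pvStepB (table : PySem.Dict String String) (line : String) : PySem.Dict String String :=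
  let l := PySem.Str.strip line
  if PySem.Str.isIn ":" l then
    let parts := (PySem.Str.splitMax? l ":" 1).getD []
    table.insert ((PySem.List.pyGet? parts 0).getD "") (PySem.Str.strip ((PySem.List.pyGet? parts 1).getD ""))
  else
    table

-- one item of the final dict comprehension: keep the pair iff its key is in FIELDS, renamed
def pvSelect (p : String × String) : Option (String × String) :=
  if pvFields.contains p.1 then some (pvFields.getD p.1 "", p.2) else none

-- the comprehension {FIELDS[k]: v for k, v in table.items() if k in FIELDS}: table's keys are
-- pairwise distinct and the FIELDS renaming injective, so no comprehension key repeats and its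
-- items are exactly the kept pairs, in table.items order
def parse_dmidecode_bios_py_alt (output : String) : List (String × String) :=
  ((((PySem.Str.split? output "\n").getD []).foldl pvStepB PySem.Dict.empty).items).filterMap pvSelect

-- ===== PRECONDITION & SPEC =====
def Spec_parse_dmidecode_bios_py (output : String) (out : List (String × String)) : Prop := out = parse_dmidecode_bios_py_alt output
instance (output : String) (out : List (String × String)) : Decidable (Spec_parse_dmidecode_bios_py output out) := by unfold Spec_parse_dmidecode_bios_py; infer_instance

-- ===== CLAIM (what is proved, stated in full; the proofs are below) =====
def Claim_equal_parse_dmidecode_bios_py : Prop := ∀ (output : String), Dom_parse_dmidecode_bios_py output → Spec_parse_dmidecode_bios_py output (parse_dmidecode_bios_py output)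

-- ===== LEMMAS AND PROOFS =====

-- the predicate 'is not a colon' (split(":", 1) scans over these characters)
def pvP (c : Char) : Bool := !(c == ':')

theorem pv_go_zero (fuel : Nat) (l cur : List Char) (acc : List (List Char)) :
    PySem.Chars.splitOnMax.go [':'] fuel 0 l cur acc = acc.reverse ++ [cur.reverse ++ l] := by
  cases fuel <;> cases l <;> simp [PySem.Chars.splitOnMax.go]

theorem pv_go_one (fuel : Nat) : ∀ (l cur : List Char) (acc : List (List Char)), l.length < fuel →
    PySem.Chars.splitOnMax.go [':'] fuel 1 l cur acc =
      acc.reverse ++ (if ':' ∈ l then [cur.reverse ++ l.takeWhile pvP, (l.dropWhile pvP).tail]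
        else [cur.reverse ++ l]) := by
  induction fuel with
  | zero => intro l cur acc h; omega
  | succ n ih =>
    intro l cur acc h
    cases l with
    | nil => simp [PySem.Chars.splitOnMax.go]
    | cons c rest =>
      by_cases hc : c = ':'
      · subst hc
        simp [PySem.Chars.splitOnMax.go, pv_go_zero, pvP]
      · have hpre : [':'].isPrefixOf (c :: rest) = false := by
          simp [List.isPrefixOf]; exact fun h' => absurd h'.symm hc
        rw [show PySem.Chars.splitOnMax.go [':'] (n+1) 1 (c :: rest) cur acc
              = PySem.Chars.splitOnMax.go [':'] n 1 rest (c :: cur) acc by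
            simp [PySem.Chars.splitOnMax.go, hpre]]
        rw [ih rest (c :: cur) acc (by simpa using Nat.lt_of_succ_lt_succ h)]
        have hp : pvP c = true := by simp [pvP, hc]
        by_cases hm : ':' ∈ rest <;> simp [hm, hp, Ne.symm hc]

theorem pv_split_colon (cs : List Char) :
    PySem.Chars.splitOnMax cs [':'] 1 =
      if ':' ∈ cs then [cs.takeWhile pvP, (cs.dropWhile pvP).tail] else [cs] := by
  rw [show PySem.Chars.splitOnMax cs [':'] 1
        = PySem.Chars.splitOnMax.go [':'] (cs.length + 1) 1 cs [] [] by
      simp [PySem.Chars.splitOnMax]]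
  rw [pv_go_one (cs.length + 1) cs [] [] (by omega)]
  simp

theorem pv_parts_colon (l : String) (h : ':' ∈ l.toList) :
    (PySem.Str.splitMax? l ":" 1).getD [] =
      [String.ofList (l.toList.takeWhile pvP), String.ofList ((l.toList.dropWhile pvP).tail)] := by
  simp [PySem.Str.splitMax?, PySem.Chars.splitMax?,
    show (":" : String).toList = [':'] from by decide, pv_split_colon, h]

theorem pv_takeWhile_key (key : List Char) (t : List Char) (hk : ∀ c ∈ key, pvP c = true) :
    (key ++ ':' :: t).takeWhile pvP = key := by
  induction key with
  | nil => simp [pvP]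
  | cons c cs ih =>
    have := hk c (by simp)
    simp [this, ih (fun d hd => hk d (by simp [hd]))]

theorem pv_startswith_colon_iff (cs key : List Char) (hk : ':' ∉ key) :
    (PySem.Chars.startswith cs (key ++ [':']) = true ↔
      (':' ∈ cs ∧ cs.takeWhile pvP = key)) := by
  rw [PySem.Chars.startswith_iff]
  constructor
  · rintro ⟨t, rfl⟩
    rw [List.append_assoc]
    refine ⟨by simp, ?_⟩
    exact pv_takeWhile_key key t (fun c hc => by
      simp [pvP]; exact fun h => hk (h ▸ hc))
  · rintro ⟨hmem, htake⟩
    have hsplit := List.takeWhile_append_dropWhile (p := pvP) (l := cs)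
    cases hd : cs.dropWhile pvP with
    | nil =>
      exfalso
      rw [← hsplit, hd, List.append_nil, htake] at hmem
      exact hk hmem
    | cons x xs =>
      have hw : cs.dropWhile pvP ≠ [] := by rw [hd]; simp
      have hx := List.head_dropWhile_not pvP hw
      simp only [hd, List.head_cons] at hx
      have hx' : x = ':' := by simpa [pvP] using hx
      refine ⟨xs, ?_⟩
      rw [← hsplit, htake, hd, hx']
      simp

theorem pv_isIn_colon (cs : List Char) : (PySem.Chars.isIn [':'] cs = true ↔ ':' ∈ cs) := by
  rw [PySem.Chars.isIn_iff_infix]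
  constructor
  · rintro ⟨s, t, rfl⟩; simp
  · intro h; obtain ⟨s, t, rfl⟩ := List.append_of_mem h; exact ⟨s, t, by simp⟩

-- the selection, as a plain case split on the key
theorem pvSelect_eq (p : String × String) :
    pvSelect p = if p.1 = "Version" then some ("version", p.2)
      else if p.1 = "Release Date" then some ("date", p.2) else none := by
  by_cases h1 : p.1 = "Version" <;> by_cases h2 : p.1 = "Release Date" <;>
    simp [pvSelect, pvFields, PySem.Dict.contains, PySem.Dict.getD, PySem.Dict.get?,
      PySem.Dict.insert, PySem.Dict.empty, h1, h2] <;>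
    try exact ⟨fun h => h1 h.symm, fun h => h2 h.symm⟩

-- B's table seen through the selection, as a dict
def pvSelD (t : PySem.Dict String String) : PySem.Dict String String :=
  ⟨t.items.filterMap pvSelect⟩

theorem pv_any_eq (k k' : String)
    (hk : (k = "Version" ∧ k' = "version") ∨ (k = "Release Date" ∧ k' = "date")) :
    ∀ l : List (String × String),
      (l.filterMap pvSelect).any (fun q => q.1 == k') = l.any (fun p => p.1 == k) := by
  intro l
  induction l with
  | nil => simp
  | cons p rest ih =>
    rw [List.filterMap_cons]
    rcases hk with ⟨rfl, rfl⟩ | ⟨rfl, rfl⟩ <;>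
      by_cases h1 : p.1 = "Version" <;> by_cases h2 : p.1 = "Release Date" <;>
        simp_all [pvSelect_eq]

theorem pv_map_replace (k k' v : String)
    (hk : (k = "Version" ∧ k' = "version") ∨ (k = "Release Date" ∧ k' = "date")) :
    ∀ l : List (String × String),
      (l.map (fun p => if p.1 == k then (k, v) else p)).filterMap pvSelect
        = (l.filterMap pvSelect).map (fun q => if q.1 == k' then (k', v) else q) := by
  intro l
  induction l with
  | nil => simp
  | cons p rest ih =>
    rw [List.map_cons, List.filterMap_cons, List.filterMap_cons]
    rcases hk with ⟨rfl, rfl⟩ | ⟨rfl, rfl⟩ <;>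
      by_cases h1 : p.1 = "Version" <;> by_cases h2 : p.1 = "Release Date" <;>
        simp_all [pvSelect_eq]

theorem pv_selD_insert_hit (t : PySem.Dict String String) (k k' v : String)
    (hk : (k = "Version" ∧ k' = "version") ∨ (k = "Release Date" ∧ k' = "date")) :
    pvSelD (t.insert k v) = (pvSelD t).insert k' v := by
  have hcon : (pvSelD t).contains k' = t.contains k := by
    simp only [PySem.Dict.contains, pvSelD]
    exact pv_any_eq k k' hk t.items
  apply PySem.Dict.ext
  by_cases hc : t.contains k = true
  · rw [show (pvSelD (t.insert k v)).items = (t.insert k v).items.filterMap pvSelect from rfl,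
      PySem.Dict.items_insert, if_pos hc,
      PySem.Dict.items_insert, hcon, if_pos hc]
    exact pv_map_replace k k' v hk t.items
  · rw [show (pvSelD (t.insert k v)).items = (t.insert k v).items.filterMap pvSelect from rfl,
      PySem.Dict.items_insert, if_neg hc,
      PySem.Dict.items_insert, hcon, if_neg hc]
    rw [List.filterMap_append]
    rcases hk with ⟨rfl, rfl⟩ | ⟨rfl, rfl⟩ <;> simp [pvSelect_eq, pvSelD]

theorem pv_selD_insert_other (t : PySem.Dict String String) (k v : String)
    (h1 : k ≠ "Version") (h2 : k ≠ "Release Date") :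
    pvSelD (t.insert k v) = pvSelD t := by
  apply PySem.Dict.ext
  rw [show (pvSelD (t.insert k v)).items = (t.insert k v).items.filterMap pvSelect from rfl,
    PySem.Dict.items_insert]
  by_cases hc : t.contains k = true
  · rw [if_pos hc]
    show _ = t.items.filterMap pvSelect
    induction t.items with
    | nil => simp
    | cons p rest ih =>
      rw [List.map_cons, List.filterMap_cons, List.filterMap_cons]
      by_cases hpk : p.1 = k <;> simp_all [pvSelect_eq]
  · rw [if_neg hc, List.filterMap_append]
    simp [pvSelect_eq, h1, h2, pvSelD]

theorem pv_step_comm (t : PySem.Dict String String) (line : String) :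
    pvStepA (pvSelD t) line = pvSelD (pvStepB t line) := by
  simp only [pvStepA, pvStepB]
  by_cases hmem : ':' ∈ (PySem.Str.strip line).toList
  · have hI : PySem.Str.isIn ":" (PySem.Str.strip line) = true := by
      rw [PySem.Str.isIn_eq, show (":" : String).toList = [':'] from by decide]
      exact (pv_isIn_colon _).2 hmem
    rw [hI]
    simp only [if_true]
    rw [pv_parts_colon _ hmem]
    simp only [show ∀ a b : String, PySem.List.pyGet? [a, b] 0 = some a from fun a b => by
        simp [PySem.List.pyGet?, PySem.List.pyIdx?],
      show ∀ a b : String, PySem.List.pyGet? [a, b] 1 = some b from fun a b => by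
        simp [PySem.List.pyGet?, PySem.List.pyIdx?],
      Option.getD_some]
    by_cases hV : (PySem.Str.strip line).toList.takeWhile pvP = "Version".toList
    · have hsw : PySem.Str.startswith (PySem.Str.strip line) "Version:" = true := by
        rw [PySem.Str.startswith_eq, show ("Version:" : String).toList = "Version".toList ++ [':'] from by decide]
        exact (pv_startswith_colon_iff _ _ (by decide)).2 ⟨hmem, hV⟩
      rw [hsw, if_pos rfl, hV, String.ofList_toList]
      exact (pv_selD_insert_hit t "Version" "version" _ (Or.inl ⟨rfl, rfl⟩)).symm
    · have hswV : PySem.Str.startswith (PySem.Str.strip line) "Version:" = false := by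
        rw [PySem.Str.startswith_eq, show ("Version:" : String).toList = "Version".toList ++ [':'] from by decide]
        rw [Bool.eq_false_iff]
        intro h
        exact hV ((pv_startswith_colon_iff _ _ (by decide)).1 h).2
      rw [hswV]
      simp only [Bool.false_eq_true, if_false]
      by_cases hR : (PySem.Str.strip line).toList.takeWhile pvP = "Release Date".toList
      · have hsw : PySem.Str.startswith (PySem.Str.strip line) "Release Date:" = true := by
          rw [PySem.Str.startswith_eq, show ("Release Date:" : String).toList = "Release Date".toList ++ [':'] from by decide]
          exact (pv_startswith_colon_iff _ _ (by decide)).2 ⟨hmem, hR⟩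
        rw [hsw, if_pos rfl, hR, String.ofList_toList]
        exact (pv_selD_insert_hit t "Release Date" "date" _ (Or.inr ⟨rfl, rfl⟩)).symm
      · have hswR : PySem.Str.startswith (PySem.Str.strip line) "Release Date:" = false := by
          rw [PySem.Str.startswith_eq, show ("Release Date:" : String).toList = "Release Date".toList ++ [':'] from by decide]
          rw [Bool.eq_false_iff]
          intro h
          exact hR ((pv_startswith_colon_iff _ _ (by decide)).1 h).2
        rw [hswR]
        simp only [Bool.false_eq_true, if_false]
        refine (pv_selD_insert_other t _ _ ?_ ?_).symm
        · intro h; exact hV (by rw [← h, String.toList_ofList])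
        · intro h; exact hR (by rw [← h, String.toList_ofList])
  · have hI : PySem.Str.isIn ":" (PySem.Str.strip line) = false := by
      rw [PySem.Str.isIn_eq, show (":" : String).toList = [':'] from by decide,
        Bool.eq_false_iff]
      intro h
      exact hmem ((pv_isIn_colon _).1 h)
    have hswV : PySem.Str.startswith (PySem.Str.strip line) "Version:" = false := by
      rw [PySem.Str.startswith_eq, show ("Version:" : String).toList = "Version".toList ++ [':'] from by decide,
        Bool.eq_false_iff]
      intro h
      exact hmem ((pv_startswith_colon_iff _ _ (by decide)).1 h).1
    have hswR : PySem.Str.startswith (PySem.Str.strip line) "Release Date:" = false := by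
      rw [PySem.Str.startswith_eq, show ("Release Date:" : String).toList = "Release Date".toList ++ [':'] from by decide,
        Bool.eq_false_iff]
      intro h
      exact hmem ((pv_startswith_colon_iff _ _ (by decide)).1 h).1
    rw [hswV, hswR, hI]
    simp

theorem pv_fold_comm (lines : List String) :
    ∀ t, lines.foldl pvStepA (pvSelD t) = pvSelD (lines.foldl pvStepB t) := by
  induction lines with
  | nil => intro t; rfl
  | cons line rest ih =>
    intro t
    rw [List.foldl_cons, List.foldl_cons, pv_step_comm, ih]

-- ===== VERDICT (by name: the statement is the Claim_ definition above) =====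
theorem parse_dmidecode_bios_py_spec : Claim_equal_parse_dmidecode_bios_py := by
  intro output _
  unfold Spec_parse_dmidecode_bios_py parse_dmidecode_bios_py parse_dmidecode_bios_py_alt
  rw [show (PySem.Dict.empty : PySem.Dict String String)
        = pvSelD PySem.Dict.empty from rfl,
    pv_fold_comm]
  rfl
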